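-- pv_equiv track=rewrite | github.com/anatulea/codesignal_challenges | Intro_CodeSignal/09_Dark Wilderness/41_digitDegree.py | digitDegree2
-- ===== SOURCE A (Python) =====
-- def digitDegree2(n):
--     count = 0
--
--     while True:
--         if n <= 9:
--             return count
--         else:
--             sum1=0
--             while n:
--                 sum1+= n%10
--                 n=n//10
--             n = sum1
--             count+=1
-- ===== SOURCE B (Python) =====
-- def digitDegree2(n):
--     if n <= 9:
--         return 0
--     return 1 + digitDegree2(sum(int(c) for c in str(n)))
-- ===== Notes on version B (the rewrite author's own statement) =====
-- stated objective: simpler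
-- what changed: Replaced the double while-loop with counter by direct recursion on the digit-degree recurrence, computing the digit sum by iterating over the characters of str(n) instead of arithmetic mod/floordiv.
import Mathlib
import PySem

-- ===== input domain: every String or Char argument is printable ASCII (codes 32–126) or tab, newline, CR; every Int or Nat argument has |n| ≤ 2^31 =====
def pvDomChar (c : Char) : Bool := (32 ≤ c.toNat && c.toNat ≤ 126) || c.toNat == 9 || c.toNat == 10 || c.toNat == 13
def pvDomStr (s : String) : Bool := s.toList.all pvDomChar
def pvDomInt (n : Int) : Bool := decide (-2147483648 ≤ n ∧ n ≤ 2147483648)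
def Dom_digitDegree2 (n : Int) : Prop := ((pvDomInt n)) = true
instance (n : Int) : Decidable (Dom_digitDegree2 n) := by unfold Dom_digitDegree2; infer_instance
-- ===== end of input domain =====

-- B replaces A's double while-loop with direct recursion on the digit-degree recurrence,
-- computing the digit sum from the characters of str(n); objective: simpler.


-- ===== PORT A =====
-- A's inner 'while n:' loop (sum1 accumulates n % 10, n becomes n // 10), with a fuel
-- totality guard: fuel n.toNat + 1 is always sufficient (the loop runs at most that often,
-- n strictly decreasing), so the guard never changes the computed value where A terminates.
def digitSumLoopA : Nat → Int → Int → Int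
  | 0, _, sum1 => sum1
  | f + 1, n, sum1 =>
      if n ≤ 0 then sum1
      else digitSumLoopA f (PySem.Int.floordiv n 10) (sum1 + PySem.Int.mod n 10)

-- A's outer 'while True:' loop with its counter (same fuel guard; each pass strictly
-- decreases n, so fuel n.toNat + 1 is sufficient)
def degLoopA : Nat → Int → Int → Int
  | 0, _, count => count
  | f + 1, n, count =>
      if n ≤ 9 then count
      else degLoopA f (digitSumLoopA (n.toNat + 1) n 0) (count + 1)

def digitDegree2 (n : Int) : Int := degLoopA (n.toNat + 1) n 0

-- ===== PORT B =====
-- sum(int(c) for c in str(n)); int(c) on a decimal digit character is c.toNat - 48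
-- (exact here: B only evaluates this on n ≥ 10, where str(n) consists of digits).
def digitSumB (n : Int) : Int :=
  ((PySem.Int.toChars n).map (fun c => (c.toNat : Int) - 48)).sum

-- B's direct recursion on the digit-degree recurrence (same fuel totality guard)
def altGo : Nat → Int → Int
  | 0, _ => 0
  | f + 1, n =>
      if n ≤ 9 then 0
      else 1 + altGo f (digitSumB n)

def digitDegree2_alt (n : Int) : Int := altGo (n.toNat + 1) n

-- ===== PRECONDITION & SPEC =====
def Spec_digitDegree2 (n : Int) (out : Int) : Prop := out = digitDegree2_alt n
instance (n : Int) (out : Int) : Decidable (Spec_digitDegree2 n out) := by unfold Spec_digitDegree2; infer_instance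

-- ===== CLAIM (what is proved, stated in full; the proofs are below) =====
def Claim_equal_digitDegree2 : Prop := ∀ (n : Int), Dom_digitDegree2 n → Spec_digitDegree2 n (digitDegree2 n)

-- ===== LEMMAS AND PROOFS =====
theorem pv_digits_sum_le (m : Nat) : (Nat.digits 10 m).sum ≤ m := Nat.digit_sum_le 10 m

theorem pv_digits_sum_lt (m : Nat) (h : 10 ≤ m) : (Nat.digits 10 m).sum < m := by
  rw [Nat.digits_def' (by norm_num : (1:Nat) < 10) (by omega : 0 < m)]
  have h1 : (Nat.digits 10 (m / 10)).sum ≤ m / 10 := pv_digits_sum_le (m / 10)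
  have h2 := Nat.div_add_mod m 10
  simp only [List.sum_cons]
  omega

-- value of A's inner loop under sufficient fuel
theorem digitSumLoopA_eq : ∀ (f : Nat) (n s : Int), 0 ≤ n → n.toNat < f →
    digitSumLoopA f n s = s + ((Nat.digits 10 n.toNat).sum : Int) := by
  intro f
  induction f with
  | zero => intro n s h hf; omega
  | succ f ih =>
    intro n s h hf
    rw [digitSumLoopA]
    split
    · rename_i hle
      have : n = 0 := le_antisymm hle h
      simp [this]
    · rename_i hgt
      rw [PySem.Int.floordiv_eq_ediv_of_pos (by norm_num : (0:Int) < 10),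
          PySem.Int.mod_eq_emod_of_pos (by norm_num : (0:Int) < 10)]
      rw [ih (n / 10) _ (by omega) (by omega)]
      rw [Nat.digits_def' (by norm_num : (1:Nat) < 10) (by omega : 0 < n.toNat)]
      have hd : (n / 10).toNat = n.toNat / 10 := by omega
      have hm : (n % 10 : Int) = ((n.toNat % 10 : Nat) : Int) := by omega
      rw [hd, hm]
      simp only [List.sum_cons]
      push_cast
      ring

-- value of B's digit sum
theorem toDigitsCore_sum (f : Nat) : ∀ (m : Nat) (acc : List Char), m < 10 ^ f →
    ((Nat.toDigitsCore 10 f m acc).map (fun c => (c.toNat : Int) - 48)).sum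
      = ((Nat.digits 10 m).sum : Int) + (acc.map (fun c => (c.toNat : Int) - 48)).sum := by
  induction f with
  | zero =>
    intro m acc hm
    interval_cases m
    simp [Nat.toDigitsCore]
  | succ f ih =>
    intro m acc hm
    have hdc : ((Nat.digitChar (m % 10)).toNat : Int) - 48 = ((m % 10 : Nat) : Int) := by
      have h10 : m % 10 < 10 := Nat.mod_lt _ (by norm_num)
      interval_cases h : (m % 10) <;> simp [Nat.digitChar]
    rw [Nat.toDigitsCore]
    split
    · rename_i h0
      rcases Nat.eq_zero_or_pos m with hz | hp
      · simp [hz] at hdc ⊢; omega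
      · rw [Nat.digits_def' (by norm_num : (1:Nat) < 10) hp]
        simp only [List.map_cons, List.sum_cons, h0, Nat.digits_zero, List.sum_nil]
        rw [hdc] at *
        push_cast
        omega
    · rename_i h0
      have hp : 0 < m := by
        rcases Nat.eq_zero_or_pos m with hz | hp
        · exact absurd (by simp [hz]) h0
        · exact hp
      rw [ih (m / 10) _ (by
        have : m / 10 < 10 ^ f := Nat.div_lt_of_lt_mul (by rw [← pow_succ']; exact hm)
        exact this)]
      rw [Nat.digits_def' (by norm_num : (1:Nat) < 10) hp]
      simp only [List.map_cons, List.sum_cons, hdc]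
      push_cast
      ring

theorem digitSumB_eq (n : Int) (h : 0 ≤ n) :
    digitSumB n = ((Nat.digits 10 n.toNat).sum : Int) := by
  unfold digitSumB
  rw [PySem.Int.toChars]
  rw [if_neg (by omega)]
  unfold Nat.toDigits
  rw [toDigitsCore_sum (n.toNat + 1) n.toNat []
    (lt_of_lt_of_le (Nat.lt_pow_self (by norm_num)) (Nat.pow_le_pow_right (by norm_num) (by omega)))]
  simp

-- the two loops agree under sufficient fuel
theorem degLoopA_eq_altGo : ∀ (f : Nat) (n count : Int), n.toNat < f →
    degLoopA f n count = count + altGo f n := by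
  intro f
  induction f with
  | zero => intro n count hf; omega
  | succ f ih =>
    intro n count hf
    rw [degLoopA, altGo]
    split
    · simp
    · rename_i h
      have hA : digitSumLoopA (n.toNat + 1) n 0 = ((Nat.digits 10 n.toNat).sum : Int) := by
        rw [digitSumLoopA_eq (n.toNat + 1) n 0 (by omega) (by omega)]; ring
      have hB : digitSumB n = ((Nat.digits 10 n.toNat).sum : Int) := digitSumB_eq n (by omega)
      have hlt := pv_digits_sum_lt n.toNat (by omega)
      rw [hA, hB, ih _ _ (by omega)]
      ring

-- ===== VERDICT (by name: the statement is the Claim_ definition above) =====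
theorem digitDegree2_spec : Claim_equal_digitDegree2 := by
  intro n _
  unfold Spec_digitDegree2 digitDegree2 digitDegree2_alt
  rw [degLoopA_eq_altGo (n.toNat + 1) n 0 (by omega)]
  ring
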